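-- pv_equiv track=rewrite | github.com/Andreea15B/Facultate_an_III | Semestrul_I/Python/TrainingTestPartial/training.py | problema7
-- ===== SOURCE A (Python) =====
-- def problema7(matrix):
--     new_list = []
--     for i in range(0, len(matrix[0])):
--         nr = matrix[0][i]
--         flag = 0
--         for j in range(1, len(matrix)):
--             if matrix[j][i] != nr:
--                 flag = 1
--         if flag == 0:
--             new_list.append(0)
--         else:
--             new_list.append(1)
--     return new_list
-- ===== SOURCE B (Python) =====
-- def problema7(matrix):
--     first = matrix[0]
--     flags = [0] * len(first)
--     for row in matrix[1:]:
--         flags = [f if row[i] == v else 1 for i, (v, f) in enumerate(zip(first, flags))]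
--     return flags
-- ===== Notes on version B (the rewrite author's own statement) =====
-- stated objective: alternative
-- what changed: B traverses the matrix row by row in a single pass, comparing each row elementwise to the first row and OR-ing mismatches into a flags vector that is rebuilt per row, instead of A's column-major double loop that rescans all rows per column; Pre_ excludes the empty matrix and ragged matrices with a row shorter than the first, on which A raises IndexError.
import Mathlib
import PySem

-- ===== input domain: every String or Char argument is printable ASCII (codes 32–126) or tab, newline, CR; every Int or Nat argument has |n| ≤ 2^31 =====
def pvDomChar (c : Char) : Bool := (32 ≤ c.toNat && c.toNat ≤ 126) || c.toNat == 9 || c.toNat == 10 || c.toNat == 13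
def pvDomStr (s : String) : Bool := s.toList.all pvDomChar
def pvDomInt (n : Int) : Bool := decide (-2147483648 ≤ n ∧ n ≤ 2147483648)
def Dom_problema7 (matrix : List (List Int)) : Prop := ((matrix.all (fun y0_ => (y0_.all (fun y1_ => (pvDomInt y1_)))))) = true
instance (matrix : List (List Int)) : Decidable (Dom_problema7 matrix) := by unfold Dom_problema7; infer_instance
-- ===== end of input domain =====

-- B replaces A's column-major double loop by a single row-major pass that compares each row to
-- the first row and folds mismatches into a flags vector rebuilt per row (alternative traversal).


-- ===== PORT A =====
def problema7 (matrix : List (List Int)) : List Int :=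
  (PySem.List.pyRange 0 ((PySem.List.pyGetD matrix 0 []).length : Int) 1).foldl
    (fun new_list i =>
      let nr := PySem.List.pyGetD (PySem.List.pyGetD matrix 0 []) i 0
      let flag := (PySem.List.pyRange 1 (matrix.length : Int) 1).foldl
        (fun flag j =>
          if PySem.List.pyGetD (PySem.List.pyGetD matrix j []) i 0 ≠ nr then (1 : Int) else flag)
        (0 : Int)
      if flag = 0 then new_list ++ [(0 : Int)] else new_list ++ [(1 : Int)])
    []

-- ===== PORT B =====
-- one row of B's loop: rebuild the flags list from enumerate(zip(first, flags))
def stepRow (row first flags : List Int) : List Int :=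
  (PySem.List.enumerate (first.zip flags) 0).map
    (fun p => if PySem.List.pyGetD row p.1 0 = p.2.1 then p.2.2 else 1)

def problema7_alt (matrix : List (List Int)) : List Int :=
  let first := PySem.List.pyGetD matrix 0 []
  let flags := List.replicate first.length (0 : Int)
  (PySem.List.slice matrix (some 1) none).foldl (fun fl row => stepRow row first fl) flags

-- ===== PRECONDITION & SPEC =====
-- Pre_ excludes exactly the inputs on which A raises IndexError: the empty matrix
-- (matrix[0]) and ragged matrices with some row shorter than the first row (matrix[j][i]).
def Pre_problema7 (matrix : List (List Int)) : Prop :=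
  matrix ≠ [] ∧ ∀ r ∈ matrix, (matrix.headD []).length ≤ r.length
instance (matrix : List (List Int)) : Decidable (Pre_problema7 matrix) := by
  unfold Pre_problema7; infer_instance
def pvWitness_problema7 : List (List Int) := [[1, 2, 3], [1, 5, 3]]
def Spec_problema7 (matrix : List (List Int)) (out : List Int) : Prop := out = problema7_alt matrix
instance (matrix : List (List Int)) (out : List Int) : Decidable (Spec_problema7 matrix out) := by
  unfold Spec_problema7; infer_instance

-- ===== CLAIM (what is proved, stated in full; the proofs are below) =====
def Claim_equal_problema7 : Prop := ∀ (matrix : List (List Int)), Dom_problema7 matrix → Pre_problema7 matrix → Spec_problema7 matrix (problema7 matrix)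

-- ===== LEMMAS AND PROOFS =====

-- the mismatch-flag loop computes 'any'
theorem flag_foldl_any (P : Int → Prop) [DecidablePred P] (l : List Int) (a : Int) :
    l.foldl (fun flag j => if P j then (1 : Int) else flag) a
      = if l.any (fun j => decide (P j)) then 1 else a := by
  induction l generalizing a with
  | nil => simp
  | cons x xs ih =>
    simp only [List.foldl_cons, List.any_cons, ih]
    by_cases hx : P x <;> simp [hx]

theorem range_any_getD {α : Type} (l : List α) (d : α) (p : α → Bool) :
    (List.range l.length).any (fun t => p (l.getD t d)) = l.any p := by
  rw [Bool.eq_iff_iff]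
  simp only [List.any_eq_true, List.mem_range]
  constructor
  · rintro ⟨t, ht, hp⟩
    exact ⟨l[t], List.getElem_mem ht, by rwa [List.getD_eq_getElem l d ht] at hp⟩
  · rintro ⟨x, hx, hp⟩
    obtain ⟨t, ht, rfl⟩ := List.mem_iff_getElem.mp hx
    exact ⟨t, ht, by rwa [List.getD_eq_getElem l d ht]⟩

-- A's result, characterised column-index-wise
theorem A_char (r0 : List Int) (rest : List (List Int)) :
    problema7 (r0 :: rest)
      = (List.range r0.length).map
          (fun k => if rest.any (fun r => r.getD k 0 ≠ r0.getD k 0) then (1 : Int) else 0) := by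
  unfold problema7
  have h0 : PySem.List.pyGetD (r0 :: rest) 0 [] = r0 := by
    simp
  rw [h0, PySem.List.pyRange_zero_nat, List.foldl_map]
  have hbody : (fun (new_list : List Int) (k : Nat) =>
      (fun new_list (i : Int) =>
        let nr := PySem.List.pyGetD r0 i 0
        let flag := (PySem.List.pyRange 1 ((r0 :: rest).length : Int) 1).foldl
          (fun flag j =>
            if PySem.List.pyGetD (PySem.List.pyGetD (r0 :: rest) j []) i 0 ≠ nr then (1 : Int) else flag)
          (0 : Int)
        if flag = 0 then new_list ++ [(0 : Int)] else new_list ++ [(1 : Int)]) new_list (↑k : Int))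
      = fun new_list k => new_list ++
          [if rest.any (fun r => r.getD k 0 ≠ r0.getD k 0) then (1 : Int) else 0] := by
    funext acc k
    simp only
    rw [flag_foldl_any]
    have hnr : PySem.List.pyGetD r0 (↑k : Int) 0 = r0.getD k 0 := PySem.List.pyGetD_natCast r0 k 0
    have hrange : PySem.List.pyRange 1 ((r0 :: rest).length : Int) 1
        = (List.range rest.length).map (fun t => (1 : Int) + ↑t) := by
      rw [PySem.List.pyRange_one]
      congr 1
      simp
    rw [hnr, hrange, List.any_map]
    simp only [Function.comp_def]
    have hj : (fun t : Nat => decide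
        (PySem.List.pyGetD (PySem.List.pyGetD (r0 :: rest) ((1 : Int) + ↑t) []) ↑k 0 ≠ r0.getD k 0))
        = fun t => decide ((rest.getD t []).getD k 0 ≠ r0.getD k 0) := by
      funext t
      have h1 : ((1 : Int) + ↑t) = ((t + 1 : Nat) : Int) := by push_cast; ring
      rw [h1, PySem.List.pyGetD_natCast, PySem.List.pyGetD_natCast]
      simp [List.getD]
    simp only [hj]
    rw [range_any_getD rest [] (fun r => decide (r.getD k 0 ≠ r0.getD k 0))]
    cases h : rest.any (fun r => decide (r.getD k 0 ≠ r0.getD k 0)) <;> simp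
  rw [hbody, PySem.List.foldl_append_singleton_eq_map]
  simp

-- one step of B rebuilds the flags pointwise
theorem stepRow_eq (row first flags : List Int) (h : flags.length = first.length) :
    stepRow row first flags
      = (List.range first.length).map
          (fun k => if row.getD k 0 = first.getD k 0 then flags.getD k 0 else 1) := by
  unfold stepRow
  apply List.ext_getElem
  · simp [PySem.List.length_enumerate, h]
  · intro k hk1 hk2
    have hk : k < first.length := by simpa using hk2
    have hkf : k < flags.length := h ▸ hk
    simp only [List.getElem_map, PySem.List.getElem_enumerate, List.getElem_zip,
      List.getElem_range, zero_add, PySem.List.pyGetD_natCast]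
    rw [List.getD_eq_getElem first 0 hk, List.getD_eq_getElem flags 0 hkf]

-- B's fold over the remaining rows, characterised
theorem fold_char (first : List Int) (rows : List (List Int)) :
    ∀ flags : List Int, flags.length = first.length →
    rows.foldl (fun fl row => stepRow row first fl) flags
      = (List.range first.length).map
          (fun k => if rows.any (fun r => r.getD k 0 ≠ first.getD k 0) then (1 : Int)
                    else flags.getD k 0) := by
  induction rows with
  | nil =>
    intro flags h
    simp only [List.foldl_nil, List.any_nil, if_neg Bool.false_ne_true]
    apply List.ext_getElem
    · simp [h]
    · intro k hk1 hk2
      have hk : k < first.length := by simpa using hk2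
      rw [List.getElem_map, List.getElem_range, List.getD_eq_getElem flags 0 (h ▸ hk)]
  | cons row rows ih =>
    intro flags h
    rw [List.foldl_cons, ih (stepRow row first flags) (by rw [stepRow_eq row first flags h]; simp)]
    apply List.map_congr_left
    intro k hk
    have hk' : k < first.length := List.mem_range.mp hk
    have hget : (stepRow row first flags).getD k 0
        = if row.getD k 0 = first.getD k 0 then flags.getD k 0 else 1 := by
      rw [stepRow_eq row first flags h]
      rw [List.getD_eq_getElem _ 0 (by simpa using hk'), List.getElem_map, List.getElem_range]
    rw [hget, List.any_cons]
    by_cases h2 : (rows.any (fun r => r.getD k 0 ≠ first.getD k 0)) = true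
    · rw [if_pos h2, if_pos (by simp only [h2, Bool.or_true])]
    · have h2' : (rows.any (fun r => r.getD k 0 ≠ first.getD k 0)) = false :=
        Bool.eq_false_iff.mpr h2
      by_cases h1 : row.getD k 0 = first.getD k 0
      · rw [if_neg h2, if_pos h1,
          if_neg (by simp only [h2', Bool.or_false, decide_eq_true_eq]; exact fun hc => hc h1)]
      · rw [if_neg h2, if_neg h1,
          if_pos (by simp only [Bool.or_eq_true, decide_eq_true_eq]; exact Or.inl h1)]

-- B's result, characterised column-index-wise (same shape as A_char)
theorem B_char (r0 : List Int) (rest : List (List Int)) :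
    problema7_alt (r0 :: rest)
      = (List.range r0.length).map
          (fun k => if rest.any (fun r => r.getD k 0 ≠ r0.getD k 0) then (1 : Int) else 0) := by
  unfold problema7_alt
  simp only [PySem.List.pyGetD_zero_cons, PySem.List.slice_from_one, List.tail_cons]
  rw [fold_char r0 rest (List.replicate r0.length 0) (by simp)]
  apply List.map_congr_left
  intro k hk
  have hk' : k < r0.length := List.mem_range.mp hk
  rw [List.getD_eq_getElem (List.replicate r0.length (0 : Int)) 0 (by simpa using hk'),
    List.getElem_replicate]

-- ===== VERDICT (by name: the statement is the Claim_ definition above) =====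
theorem problema7_spec : Claim_equal_problema7 := by
  intro matrix _ hpre
  obtain ⟨hne, _⟩ := hpre
  cases matrix with
  | nil => exact absurd rfl hne
  | cons r0 rest =>
    show problema7 (r0 :: rest) = problema7_alt (r0 :: rest)
    rw [A_char, B_char]
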